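-- pv_equiv track=rewrite | github.com/mcx797/MxxBatch | MXX/MxPath/MxPath.py | __loadPath
-- ===== SOURCE A (Python) =====
-- def __loadPath(path:str):
--     ans = []
--     INTs = path.split('\\')
--     for INT in INTs:
--         blks = INT.split(('/'))
--         for blk in blks:
--             ans.append(blk)
--     return ans
-- ===== SOURCE B (Python) =====
-- def __loadPath(path: str):
--     ans = []
--     buf = ''
--     for ch in path:
--         if ch == '\\' or ch == '/':
--             ans.append(buf)
--             buf = ''
--         else:
--             buf += ch
--     ans.append(buf)
--     return ans
-- ===== Notes on version B (the rewrite author's own statement) =====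
-- stated objective: alternative
-- what changed: Replaced the split-on-backslash then re-split-on-slash nested loops with a single character-by-character scan that flushes a running buffer at either delimiter.
import Mathlib
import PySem

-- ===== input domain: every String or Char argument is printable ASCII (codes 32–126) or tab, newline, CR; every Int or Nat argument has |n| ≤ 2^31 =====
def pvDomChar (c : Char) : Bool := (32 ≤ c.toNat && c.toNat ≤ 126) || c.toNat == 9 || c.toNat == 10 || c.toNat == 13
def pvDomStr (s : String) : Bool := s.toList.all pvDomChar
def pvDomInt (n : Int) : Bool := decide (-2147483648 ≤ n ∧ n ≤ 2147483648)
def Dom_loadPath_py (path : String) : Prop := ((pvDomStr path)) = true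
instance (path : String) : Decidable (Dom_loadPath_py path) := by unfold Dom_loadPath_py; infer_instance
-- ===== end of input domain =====

-- B replaces A's nested split-then-resplit loops by one character scan with a running buffer
-- flushed at either delimiter; equivalence of the return values is proved on all inputs.

-- ===== PORT A =====
-- ans = []; for INT in path.split('\\'): for blk in INT.split('/'): ans.append(blk); return ans
def loadPath_py (path : String) : List String :=
  let INTs : List String := (PySem.Chars.splitOn path.toList ['\\']).map String.ofList
  INTs.foldl (fun ans INT =>
    let blks : List String := (PySem.Chars.splitOn INT.toList ['/']).map String.ofList
    blks.foldl (fun ans blk => ans ++ [blk]) ans) []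

-- ===== PORT B =====
-- the running string buffer is kept as a List Char, flushed with String.ofList
def loadPathAltGo : List Char → List Char → List String
  | [], buf => [String.ofList buf]
  | c :: cs, buf =>
    if c = '\\' ∨ c = '/' then String.ofList buf :: loadPathAltGo cs []
    else loadPathAltGo cs (buf ++ [c])

def loadPath_py_alt (path : String) : List String :=
  loadPathAltGo path.toList []

-- ===== PRECONDITION & SPEC =====
def Spec_loadPath_py (path : String) (out : List String) : Prop := out = loadPath_py_alt path
instance (path : String) (out : List String) : Decidable (Spec_loadPath_py path out) := by unfold Spec_loadPath_py; infer_instance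

-- ===== CLAIM (what is proved, stated in full; the proofs are below) =====
def Claim_equal_loadPath_py : Prop := ∀ (path : String), Dom_loadPath_py path → Spec_loadPath_py path (loadPath_py path)

-- ===== LEMMAS AND PROOFS =====

-- structural single-character split, the reference shape for both ports
def charSplit (sep : Char) : List Char → List (List Char)
  | [] => [[]]
  | c :: cs =>
    if c = sep then [] :: charSplit sep cs
    else (charSplit sep cs).modifyHead (c :: ·)

theorem charSplit_ne_nil (sep : Char) (cs : List Char) : charSplit sep cs ≠ [] := by
  induction cs with
  | nil => simp [charSplit]
  | cons c cs ih =>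
    simp only [charSplit]
    split_ifs
    · simp
    · cases h : charSplit sep cs with
      | nil => exact absurd h ih
      | cons t ts => simp [List.modifyHead]

theorem splitOn_go_eq (sep : Char) :
    ∀ (fuel : Nat) (l cur : List Char) (acc : List (List Char)), l.length ≤ fuel →
    PySem.Chars.splitOn.go [sep] fuel l cur acc =
      acc.reverse ++ (charSplit sep l).modifyHead (cur.reverse ++ ·) := by
  intro fuel
  induction fuel with
  | zero =>
    intro l cur acc h
    have : l = [] := by cases l <;> simp_all
    subst this
    simp [PySem.Chars.splitOn.go, charSplit]
  | succ f ih =>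
    intro l cur acc h
    cases l with
    | nil => simp [PySem.Chars.splitOn.go, charSplit]
    | cons c rest =>
      simp only [PySem.Chars.splitOn.go]
      by_cases hc : c = sep
      · subst hc
        have hpre : List.isPrefixOf [c] (c :: rest) = true := by
          simp [List.isPrefixOf]
        rw [if_pos hpre]
        simp only [List.length_cons] at h
        have hdrop : List.drop (List.length [c]) (c :: rest) = rest := by simp
        rw [hdrop, ih _ _ _ (by omega)]
        have hmod : ∀ l : List (List Char), l.modifyHead (fun x => x) = l := by
          intro l; cases l <;> simp [List.modifyHead]
        simp only [charSplit, List.reverse_cons, List.reverse_nil, List.nil_append]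
        simp [hmod]
      · have hpre : List.isPrefixOf [sep] (c :: rest) = false := by
          simp [List.isPrefixOf]
          exact fun h' => hc h'.symm
        rw [if_neg (by simp [hpre])]
        simp only [List.length_cons] at h
        rw [ih _ _ _ (by omega)]
        obtain ⟨t, ts, ht⟩ : ∃ t ts, charSplit sep rest = t :: ts := by
          cases hcs : charSplit sep rest with
          | nil => exact absurd hcs (charSplit_ne_nil sep rest)
          | cons t ts => exact ⟨t, ts, rfl⟩
        simp [charSplit, hc, ht, List.modifyHead]

theorem splitOn_single (sep : Char) (cs : List Char) :
    PySem.Chars.splitOn cs [sep] = charSplit sep cs := by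
  unfold PySem.Chars.splitOn
  rw [splitOn_go_eq sep (cs.length + 1) cs [] [] (by omega)]
  obtain ⟨t, ts, ht⟩ : ∃ t ts, charSplit sep cs = t :: ts := by
    cases hcs : charSplit sep cs with
    | nil => exact absurd hcs (charSplit_ne_nil sep cs)
    | cons t ts => exact ⟨t, ts, rfl⟩
  simp [ht, List.modifyHead]

-- the two-level split flattened, as one structural function
def twoSplit (cs : List Char) : List (List Char) :=
  (charSplit '\\' cs).flatMap (charSplit '/')

theorem twoSplit_ne_nil (cs : List Char) : twoSplit cs ≠ [] := by
  unfold twoSplit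
  obtain ⟨t, ts, ht⟩ : ∃ t ts, charSplit '\\' cs = t :: ts := by
    cases hcs : charSplit '\\' cs with
    | nil => exact absurd hcs (charSplit_ne_nil _ cs)
    | cons t ts => exact ⟨t, ts, rfl⟩
  obtain ⟨u, us, hu⟩ : ∃ u us, charSplit '/' t = u :: us := by
    cases hcs : charSplit '/' t with
    | nil => exact absurd hcs (charSplit_ne_nil _ t)
    | cons u us => exact ⟨u, us, rfl⟩
  simp [ht, hu]

theorem twoSplit_cons (c : Char) (cs : List Char) :
    twoSplit (c :: cs) =
      if c = '\\' ∨ c = '/' then [] :: twoSplit cs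
      else (twoSplit cs).modifyHead (c :: ·) := by
  unfold twoSplit
  by_cases h1 : c = '\\'
  · subst h1
    simp [charSplit]
  · obtain ⟨t, ts, ht⟩ : ∃ t ts, charSplit '\\' cs = t :: ts := by
      cases hcs : charSplit '\\' cs with
      | nil => exact absurd hcs (charSplit_ne_nil _ cs)
      | cons t ts => exact ⟨t, ts, rfl⟩
    by_cases h2 : c = '/'
    · subst h2
      simp [charSplit, h1, ht, List.modifyHead]
    · obtain ⟨u, us, hu⟩ : ∃ u us, charSplit '/' t = u :: us := by
        cases hcs : charSplit '/' t with
        | nil => exact absurd hcs (charSplit_ne_nil _ t)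
        | cons u us => exact ⟨u, us, rfl⟩
      simp [charSplit, h1, h2, ht, hu, List.modifyHead]

theorem loadPathAltGo_eq (cs : List Char) :
    ∀ buf, loadPathAltGo cs buf =
      ((twoSplit cs).modifyHead (buf ++ ·)).map String.ofList := by
  induction cs with
  | nil =>
    intro buf
    simp [loadPathAltGo, twoSplit, charSplit, List.modifyHead]
  | cons c cs ih =>
    intro buf
    obtain ⟨t, ts, ht⟩ : ∃ t ts, twoSplit cs = t :: ts := by
      cases hcs : twoSplit cs with
      | nil => exact absurd hcs (twoSplit_ne_nil cs)
      | cons t ts => exact ⟨t, ts, rfl⟩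
    simp only [loadPathAltGo]
    split_ifs with h
    · rw [ih [], twoSplit_cons, if_pos h]
      simp [ht, List.modifyHead]
    · rw [ih (buf ++ [c]), twoSplit_cons, if_neg h]
      simp [ht, List.modifyHead]

theorem loadPath_py_eq_twoSplit (path : String) :
    loadPath_py path = (twoSplit path.toList).map String.ofList := by
  unfold loadPath_py twoSplit
  rw [List.foldl_map]
  simp only [splitOn_single, String.toList_ofList]
  have inner : ∀ (bs : List String) (ans : List String),
      bs.foldl (fun ans blk => ans ++ [blk]) ans = ans ++ bs := by
    intro bs
    induction bs with
    | nil => simp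
    | cons b bs ihb => intro ans; simp [List.foldl_cons, ihb]
  have hfun : (fun (ans : List String) (t : List Char) =>
        ((charSplit '/' t).map String.ofList).foldl (fun ans blk => ans ++ [blk]) ans)
      = (fun ans t => ans ++ (charSplit '/' t).map String.ofList) := by
    funext ans t; exact inner _ _
  rw [hfun]
  have outer : ∀ (l : List (List Char)) (ans : List String),
      l.foldl (fun ans t => ans ++ (charSplit '/' t).map String.ofList) ans
      = ans ++ (l.flatMap (charSplit '/')).map String.ofList := by
    intro l
    induction l with
    | nil => simp
    | cons t ts iht =>
      intro ans
      simp only [List.foldl_cons]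
      rw [iht]
      simp [List.append_assoc]
  simpa using outer (charSplit '\\' path.toList) []

-- ===== VERDICT (by name: the statement is the Claim_ definition above) =====
theorem loadPath_py_spec : Claim_equal_loadPath_py := by
  intro path _
  unfold Spec_loadPath_py loadPath_py_alt
  rw [loadPath_py_eq_twoSplit, loadPathAltGo_eq]
  obtain ⟨t, ts, ht⟩ : ∃ t ts, twoSplit path.toList = t :: ts := by
    cases hcs : twoSplit path.toList with
    | nil => exact absurd hcs (twoSplit_ne_nil _)
    | cons t ts => exact ⟨t, ts, rfl⟩
  simp [ht, List.modifyHead]
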